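-- pv_equiv track=rewrite | github.com/mortyc126-debug/SHA | p36_a3b_j_sweep.py | compute_f17_with_j
-- ===== SOURCE A (Python) =====
-- MASK = 0xFFFFFFFF
--
-- def rotr(x, n): return ((x >> n) | (x << (32-n))) & MASK
--
-- def sig0(x):  return rotr(x,7)  ^ rotr(x,18) ^ (x>>3)
--
-- def sig1(x):  return rotr(x,17) ^ rotr(x,19) ^ (x>>10)
--
-- def Sig0(x):  return rotr(x,2)  ^ rotr(x,13) ^ rotr(x,22)
--
-- def Sig1(x):  return rotr(x,6)  ^ rotr(x,11) ^ rotr(x,25)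
--
-- def Ch(e,f,g):  return ((e&f) ^ (~e&g)) & MASK
--
-- def Maj(a,b,c): return (a&b) ^ (a&c) ^ (b&c)
--
-- K = [0x428a2f98,0x71374491,0xb5c0fbcf,0xe9b5dba5,0x3956c25b,0x59f111f1,0x923f82a4,0xab1c5ed5,
--      0xd807aa98,0x12835b01,0x243185be,0x550c7dc3,0x72be5d74,0x80deb1fe,0x9bdc06a7,0xc19bf174,
--      0xe49b69c1,0xefbe4786,0x0fc19dc6,0x240ca1cc,0x2de92c6f,0x4a7484aa,0x5cb0a9dc,0x76f988da,
--      0x983e5152,0xa831c66d,0xb00327c8,0xbf597fc7,0xc6e00bf3,0xd5a79147,0x06ca6351,0x14292967,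
--      0x27b70a85,0x2e1b2138,0x4d2c6dfc,0x53380d13,0x650a7354,0x766a0abb,0x81c2c92e,0x92722c85,
--      0xa2bfe8a1,0xa81a664b,0xc24b8b70,0xc76c51a3,0xd192e819,0xd6990624,0xf40e3585,0x106aa070,
--      0x19a4c116,0x1e376c08,0x2748774c,0x34b0bcb5,0x391c0cb3,0x4ed8aa4a,0x5b9cca4f,0x682e6ff3,
--      0x748f82ee,0x78a5636f,0x84c87814,0x8cc70208,0x90befffa,0xa4506ceb,0xbef9a3f7,0xc67178f2]
--
-- IV = [0x6a09e667,0xbb67ae85,0x3c6ef372,0xa54ff53a,0x510e527f,0x9b05688c,0x1f83d9ab,0x5be0cd19]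
--
-- def make_schedule(W16):
--     W = list(W16) + [0]*48
--     for i in range(16, 64):
--         W[i] = (sig1(W[i-2]) + W[i-7] + sig0(W[i-15]) + W[i-16]) & MASK
--     return W
--
-- def sha_rounds(W, R):
--     a,b,c,d,e,f,g,h = IV
--     states = [[a,b,c,d,e,f,g,h]]
--     for r in range(R):
--         T1 = (h + Sig1(e) + Ch(e,f,g) + K[r] + W[r]) & MASK
--         T2 = (Sig0(a) + Maj(a,b,c)) & MASK
--         h=g; g=f; f=e; e=(d+T1)&MASK
--         d=c; c=b; b=a; a=(T1+T2)&MASK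
--         states.append([a,b,c,d,e,f,g,h])
--     return states
--
-- def compute_f17_with_j(W0, W1, j):
--     """Каскад с DW0=2^j: f17 = Da13 + δW16."""
--     DW0 = 1 << j
--     Wn = [W0, W1] + [0]*14
--     DWs = [0]*16
--     DWs[0] = DW0
--
--     Wf_tmp = [(Wn[i]+DWs[i])&MASK for i in range(16)]
--     sn3 = sha_rounds(make_schedule(Wn), 3)
--     sf3 = sha_rounds(make_schedule(Wf_tmp), 3)
--     DWs[2] = (-(sf3[3][4] - sn3[3][4])) & MASK
--
--     for step in range(13):
--         wi = step+3; dt = step+4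
--         Wfc = [(Wn[i]+DWs[i])&MASK for i in range(16)]
--         sn = sha_rounds(make_schedule(Wn), dt)
--         sf = sha_rounds(make_schedule(Wfc), dt)
--         DWs[wi] = (-(sf[dt][4] - sn[dt][4])) & MASK
--
--     Wf = [(Wn[i]+DWs[i])&MASK for i in range(16)]
--     Wn_s = make_schedule(Wn); Wf_s = make_schedule(Wf)
--     sn = sha_rounds(Wn_s, 14); sf = sha_rounds(Wf_s, 14)
--     da13 = (sf[13][0] - sn[13][0]) & MASK
--     DW16 = (Wf_s[16] - Wn_s[16]) & MASK
--     f17 = (da13 + DW16) & MASK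
--     return f17, da13, DW16
-- ===== SOURCE B (Python) =====
-- MASK = 0xFFFFFFFF
--
-- def rotr(x, n): return ((x >> n) | (x << (32-n))) & MASK
--
-- def sig0(x):  return rotr(x,7)  ^ rotr(x,18) ^ (x>>3)
--
-- def sig1(x):  return rotr(x,17) ^ rotr(x,19) ^ (x>>10)
--
-- def Sig0(x):  return rotr(x,2)  ^ rotr(x,13) ^ rotr(x,22)
--
-- def Sig1(x):  return rotr(x,6)  ^ rotr(x,11) ^ rotr(x,25)
--
-- def Ch(e,f,g):  return ((e&f) ^ (~e&g)) & MASK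
--
-- def Maj(a,b,c): return (a&b) ^ (a&c) ^ (b&c)
--
-- K = [0x428a2f98,0x71374491,0xb5c0fbcf,0xe9b5dba5,0x3956c25b,0x59f111f1,0x923f82a4,0xab1c5ed5,
--      0xd807aa98,0x12835b01,0x243185be,0x550c7dc3,0x72be5d74,0x80deb1fe,0x9bdc06a7,0xc19bf174,
--      0xe49b69c1,0xefbe4786,0x0fc19dc6,0x240ca1cc,0x2de92c6f,0x4a7484aa,0x5cb0a9dc,0x76f988da,
--      0x983e5152,0xa831c66d,0xb00327c8,0xbf597fc7,0xc6e00bf3,0xd5a79147,0x06ca6351,0x14292967,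
--      0x27b70a85,0x2e1b2138,0x4d2c6dfc,0x53380d13,0x650a7354,0x766a0abb,0x81c2c92e,0x92722c85,
--      0xa2bfe8a1,0xa81a664b,0xc24b8b70,0xc76c51a3,0xd192e819,0xd6990624,0xf40e3585,0x106aa070,
--      0x19a4c116,0x1e376c08,0x2748774c,0x34b0bcb5,0x391c0cb3,0x4ed8aa4a,0x5b9cca4f,0x682e6ff3,
--      0x748f82ee,0x78a5636f,0x84c87814,0x8cc70208,0x90befffa,0xa4506ceb,0xbef9a3f7,0xc67178f2]
--
-- IV = [0x6a09e667,0xbb67ae85,0x3c6ef372,0xa54ff53a,0x510e527f,0x9b05688c,0x1f83d9ab,0x5be0cd19]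
--
-- def round1(st, k, w):
--     """One SHA-256 round on an 8-tuple state."""
--     a,b,c,d,e,f,g,h = st
--     T1 = (h + Sig1(e) + Ch(e,f,g) + k + w) & MASK
--     T2 = (Sig0(a) + Maj(a,b,c)) & MASK
--     return ((T1+T2)&MASK, a, b, c, (d+T1)&MASK, e, f, g)
--
-- def compute_f17_with_j(W0, W1, j):
--     """Cascade with DW0=2^j, computed incrementally: one 16-round reference pass
--     recording the e-component after every round, then one forward pass over the
--     perturbed branch that, at each word position wi >= 2, probes one round with
--     word 0, derives the cancelling correction, and advances one round with it —
--     no per-step recomputation of full schedules/cascades, and message-schedule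
--     word 16 is produced directly by its recurrence."""
--     DW0 = 1 << j
--     ref = [W0, W1] + [0]*14
--
--     # reference pass, once
--     st = tuple(IV)
--     ref_e = [st[4]]
--     ref_a13 = 0
--     for r in range(16):
--         if r == 13:
--             ref_a13 = st[0]
--         st = round1(st, K[r], ref[r])
--         ref_e.append(st[4])
--
--     # incremental perturbed pass
--     fw = [(W0 + DW0) & MASK, W1 & MASK]
--     st = tuple(IV)
--     for r in range(2):
--         st = round1(st, K[r], fw[r])
--     f_a13 = 0
--     for wi in range(2, 16):
--         if wi == 13:
--             f_a13 = st[0]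
--         probe = round1(st, K[wi], 0)
--         d = (ref_e[wi+1] - probe[4]) & MASK
--         fw.append(d)
--         st = round1(st, K[wi], d)
--
--     w16_f = (sig1(fw[14]) + fw[9] + sig0(fw[1]) + fw[0]) & MASK
--     w16_n = (sig1(ref[14]) + ref[9] + sig0(ref[1]) + ref[0]) & MASK
--     da13 = (f_a13 - ref_a13) & MASK
--     DW16 = (w16_f - w16_n) & MASK
--     f17 = (da13 + DW16) & MASK
--     return f17, da13, DW16
-- ===== Notes on version B (the rewrite author's own statement) =====
-- stated objective: alternative
-- what changed: B replaces A's 28 from-scratch schedule+cascade recomputations with two incremental single passes over an 8-word state tuple: one reference pass recording each round's e-component, and one perturbed pass that probes a single round with word 0 and advances with the derived correction, computing schedule word 16 directly from its recurrence instead of building 64-entry schedules and states lists; per-call work drops ~30x but the fixed-size runtime is below a timing run's resolution.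
import Mathlib
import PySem

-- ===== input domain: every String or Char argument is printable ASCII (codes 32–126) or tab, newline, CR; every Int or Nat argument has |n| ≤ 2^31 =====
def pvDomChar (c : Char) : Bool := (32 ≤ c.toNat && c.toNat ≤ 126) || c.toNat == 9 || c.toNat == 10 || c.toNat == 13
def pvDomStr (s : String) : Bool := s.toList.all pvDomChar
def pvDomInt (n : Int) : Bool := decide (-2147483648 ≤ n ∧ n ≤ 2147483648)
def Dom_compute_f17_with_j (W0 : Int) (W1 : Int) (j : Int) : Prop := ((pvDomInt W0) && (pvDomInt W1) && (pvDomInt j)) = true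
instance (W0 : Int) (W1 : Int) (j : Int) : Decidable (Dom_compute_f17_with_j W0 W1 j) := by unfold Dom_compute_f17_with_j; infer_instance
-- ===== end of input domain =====

-- B replaces A's 28 from-scratch schedule/cascade recomputations by two incremental passes
-- over a single 8-word state tuple (one reference pass recording each round's e-component, one
-- perturbed pass probing a round with word 0 and advancing with the derived correction), and
-- computes schedule word 16 directly from its recurrence (less work per call; runtime too small
-- for a timing run to measure).

-- ===== shared module-level helpers (identical in Source A and Source B) =====
-- Python 'x >> n' / 'x << n' on ints are exactly floor-division/multiplication by 2^n.
def pvMask (x : Int) : Int := PySem.Int.band x 4294967295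

def pvRotr (x : Int) (n : Nat) : Int :=
  pvMask (PySem.Int.bor (PySem.Int.floordiv x (2 ^ n)) (x * 2 ^ (32 - n)))

def pvSig0 (x : Int) : Int :=
  PySem.Int.bxor (PySem.Int.bxor (pvRotr x 7) (pvRotr x 18)) (PySem.Int.floordiv x (2 ^ 3))

def pvSig1 (x : Int) : Int :=
  PySem.Int.bxor (PySem.Int.bxor (pvRotr x 17) (pvRotr x 19)) (PySem.Int.floordiv x (2 ^ 10))

def pvBSig0 (x : Int) : Int :=
  PySem.Int.bxor (PySem.Int.bxor (pvRotr x 2) (pvRotr x 13)) (pvRotr x 22)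

def pvBSig1 (x : Int) : Int :=
  PySem.Int.bxor (PySem.Int.bxor (pvRotr x 6) (pvRotr x 11)) (pvRotr x 25)

-- Python '~e' is -(e+1)
def pvCh (e f g : Int) : Int :=
  pvMask (PySem.Int.bxor (PySem.Int.band e f) (PySem.Int.band (-(e) - 1) g))

def pvMaj (a b c : Int) : Int :=
  PySem.Int.bxor (PySem.Int.bxor (PySem.Int.band a b) (PySem.Int.band a c)) (PySem.Int.band b c)

def pvK : List Int :=
  [0x428a2f98,0x71374491,0xb5c0fbcf,0xe9b5dba5,0x3956c25b,0x59f111f1,0x923f82a4,0xab1c5ed5,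
   0xd807aa98,0x12835b01,0x243185be,0x550c7dc3,0x72be5d74,0x80deb1fe,0x9bdc06a7,0xc19bf174,
   0xe49b69c1,0xefbe4786,0x0fc19dc6,0x240ca1cc,0x2de92c6f,0x4a7484aa,0x5cb0a9dc,0x76f988da,
   0x983e5152,0xa831c66d,0xb00327c8,0xbf597fc7,0xc6e00bf3,0xd5a79147,0x06ca6351,0x14292967,
   0x27b70a85,0x2e1b2138,0x4d2c6dfc,0x53380d13,0x650a7354,0x766a0abb,0x81c2c92e,0x92722c85,
   0xa2bfe8a1,0xa81a664b,0xc24b8b70,0xc76c51a3,0xd192e819,0xd6990624,0xf40e3585,0x106aa070,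
   0x19a4c116,0x1e376c08,0x2748774c,0x34b0bcb5,0x391c0cb3,0x4ed8aa4a,0x5b9cca4f,0x682e6ff3,
   0x748f82ee,0x78a5636f,0x84c87814,0x8cc70208,0x90befffa,0xa4506ceb,0xbef9a3f7,0xc67178f2]

-- ===== PORT A =====
-- make_schedule: W = list(W16)+[0]*48; for i in range(16,64): W[i] = …  (all indices in range)
def pvSchedStep (W : List Int) (i : Nat) : List Int :=
  W.set i (pvMask (pvSig1 (W.getD (i - 2) 0) + W.getD (i - 7) 0 +
                   pvSig0 (W.getD (i - 15) 0) + W.getD (i - 16) 0))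

def makeSchedule (W16 : List Int) : List Int :=
  (List.range' 16 48).foldl pvSchedStep (W16 ++ List.replicate 48 (0 : Int))

-- sha_rounds: state (a,…,h) starts at IV; each round appends the new state list
def pvRoundStep (W : List Int)
    (st : (Int × Int × Int × Int × Int × Int × Int × Int) × List (List Int)) (r : Nat) :
    (Int × Int × Int × Int × Int × Int × Int × Int) × List (List Int) :=
  let (a, b, c, d, e, f, g, h) := st.1
  let T1 := pvMask (h + pvBSig1 e + pvCh e f g + pvK.getD r 0 + W.getD r 0)
  let T2 := pvMask (pvBSig0 a + pvMaj a b c)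
  let h' := g; let g' := f; let f' := e; let e' := pvMask (d + T1)
  let d' := c; let c' := b; let b' := a; let a' := pvMask (T1 + T2)
  ((a', b', c', d', e', f', g', h'), st.2 ++ [[a', b', c', d', e', f', g', h']])

def pvInit : (Int × Int × Int × Int × Int × Int × Int × Int) × List (List Int) :=
  ((0x6a09e667, 0xbb67ae85, 0x3c6ef372, 0xa54ff53a, 0x510e527f, 0x9b05688c, 0x1f83d9ab, 0x5be0cd19),
   [[0x6a09e667, 0xbb67ae85, 0x3c6ef372, 0xa54ff53a, 0x510e527f, 0x9b05688c, 0x1f83d9ab, 0x5be0cd19]])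

def shaRounds (W : List Int) (R : Nat) : List (List Int) :=
  ((List.range R).foldl (pvRoundStep W) pvInit).2

def compute_f17_with_j (W0 : Int) (W1 : Int) (j : Int) : Int × Int × Int :=
  let DW0 : Int := ((1 <<< j.toNat : Nat) : Int)  -- 1 << j (Pre_ requires 0 ≤ j; Python raises otherwise)
  let Wn : List Int := [W0, W1] ++ List.replicate 14 (0 : Int)
  let DWs : List Int := (List.replicate 16 (0 : Int)).set 0 DW0
  let Wf_tmp : List Int := (List.range 16).map (fun i => pvMask (Wn.getD i 0 + DWs.getD i 0))
  let sn3 := shaRounds (makeSchedule Wn) 3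
  let sf3 := shaRounds (makeSchedule Wf_tmp) 3
  let DWs := DWs.set 2 (pvMask (-((sf3.getD 3 []).getD 4 0 - (sn3.getD 3 []).getD 4 0)))
  let DWs := (List.range 13).foldl (fun DWs step =>
      let wi := step + 3
      let dt := step + 4
      let Wfc : List Int := (List.range 16).map (fun i => pvMask (Wn.getD i 0 + DWs.getD i 0))
      let sn := shaRounds (makeSchedule Wn) dt
      let sf := shaRounds (makeSchedule Wfc) dt
      DWs.set wi (pvMask (-((sf.getD dt []).getD 4 0 - (sn.getD dt []).getD 4 0)))) DWs
  let Wf : List Int := (List.range 16).map (fun i => pvMask (Wn.getD i 0 + DWs.getD i 0))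
  let Wn_s := makeSchedule Wn
  let Wf_s := makeSchedule Wf
  let sn := shaRounds Wn_s 14
  let sf := shaRounds Wf_s 14
  let da13 := pvMask ((sf.getD 13 []).getD 0 0 - (sn.getD 13 []).getD 0 0)
  let DW16 := pvMask (Wf_s.getD 16 0 - Wn_s.getD 16 0)
  let f17 := pvMask (da13 + DW16)
  (f17, da13, DW16)

-- ===== PORT B =====
-- Source B's round1: one SHA-256 round on an 8-tuple state
def pvRound1 (st : Int × Int × Int × Int × Int × Int × Int × Int) (k w : Int) :
    Int × Int × Int × Int × Int × Int × Int × Int :=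
  let (a, b, c, d, e, f, g, h) := st
  let T1 := pvMask (h + pvBSig1 e + pvCh e f g + k + w)
  let T2 := pvMask (pvBSig0 a + pvMaj a b c)
  (pvMask (T1 + T2), a, b, c, pvMask (d + T1), e, f, g)

def pvIVt : Int × Int × Int × Int × Int × Int × Int × Int :=
  (0x6a09e667, 0xbb67ae85, 0x3c6ef372, 0xa54ff53a, 0x510e527f, 0x9b05688c, 0x1f83d9ab, 0x5be0cd19)

def compute_f17_with_j_alt (W0 : Int) (W1 : Int) (j : Int) : Int × Int × Int :=
  let DW0 : Int := ((1 <<< j.toNat : Nat) : Int)  -- 1 << j (Pre_ requires 0 ≤ j)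
  let ref : List Int := [W0, W1] ++ List.replicate 14 (0 : Int)
  -- reference pass, once: fold state = (st, ref_e, ref_a13)
  let refRes :=
    (List.range 16).foldl (fun (acc : (Int × Int × Int × Int × Int × Int × Int × Int) × List Int × Int) r =>
        let a13' := if r = 13 then acc.1.1 else acc.2.2
        let st' := pvRound1 acc.1 (pvK.getD r 0) (ref.getD r 0)
        (st', acc.2.1 ++ [st'.2.2.2.2.1], a13'))
      (pvIVt, [pvIVt.2.2.2.2.1], 0)
  let refE := refRes.2.1
  let ref_a13 := refRes.2.2
  -- incremental perturbed pass: fold state = (fw, st, f_a13)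
  let fw0 : List Int := [pvMask (W0 + DW0), pvMask W1]
  let st0 := (List.range 2).foldl (fun st r => pvRound1 st (pvK.getD r 0) (fw0.getD r 0)) pvIVt
  let loopRes :=
    (List.range' 2 14).foldl (fun (acc : List Int × (Int × Int × Int × Int × Int × Int × Int × Int) × Int) wi =>
        let fa' := if wi = 13 then acc.2.1.1 else acc.2.2
        let probe := pvRound1 acc.2.1 (pvK.getD wi 0) 0
        let d := pvMask (refE.getD (wi + 1) 0 - probe.2.2.2.2.1)
        (acc.1 ++ [d], pvRound1 acc.2.1 (pvK.getD wi 0) d, fa'))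
      (fw0, st0, 0)
  let fw := loopRes.1
  let f_a13 := loopRes.2.2
  let w16f := pvMask (pvSig1 (fw.getD 14 0) + fw.getD 9 0 + pvSig0 (fw.getD 1 0) + fw.getD 0 0)
  let w16n := pvMask (pvSig1 (ref.getD 14 0) + ref.getD 9 0 + pvSig0 (ref.getD 1 0) + ref.getD 0 0)
  let da13 := pvMask (f_a13 - ref_a13)
  let DW16 := pvMask (w16f - w16n)
  let f17 := pvMask (da13 + DW16)
  (f17, da13, DW16)

-- ===== PRECONDITION & SPEC =====
-- Python raises ValueError on '1 << j' for negative j; A returns for every j ≥ 0.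
def Pre_compute_f17_with_j (_W0 : Int) (_W1 : Int) (j : Int) : Prop := 0 ≤ j
instance (W0 : Int) (W1 : Int) (j : Int) : Decidable (Pre_compute_f17_with_j W0 W1 j) := by
  unfold Pre_compute_f17_with_j; infer_instance

def pvWitness_compute_f17_with_j : Int × Int × Int := (1, 2, 3)

def Spec_compute_f17_with_j (W0 : Int) (W1 : Int) (j : Int) (out : Int × Int × Int) : Prop :=
  out = compute_f17_with_j_alt W0 W1 j
instance (W0 : Int) (W1 : Int) (j : Int) (out : Int × Int × Int) :
    Decidable (Spec_compute_f17_with_j W0 W1 j out) := by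
  unfold Spec_compute_f17_with_j; infer_instance

-- ===== CLAIM (what is proved, stated in full; the proofs are below) =====
def Claim_equal_compute_f17_with_j : Prop :=
  ∀ (W0 : Int) (W1 : Int) (j : Int), Dom_compute_f17_with_j W0 W1 j →
    Pre_compute_f17_with_j W0 W1 j →
    Spec_compute_f17_with_j W0 W1 j (compute_f17_with_j W0 W1 j)

-- ===== LEMMAS AND PROOFS =====

-- proof-side abbreviations
def pvE (st : Int × Int × Int × Int × Int × Int × Int × Int) : Int := st.2.2.2.2.1

def pvToList (st : Int × Int × Int × Int × Int × Int × Int × Int) : List Int :=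
  [st.1, st.2.1, st.2.2.1, st.2.2.2.1, st.2.2.2.2.1, st.2.2.2.2.2.1, st.2.2.2.2.2.2.1, st.2.2.2.2.2.2.2]

-- the pure iterated round: state after n rounds of message W
def pvIter (W : List Int) (n : Nat) : Int × Int × Int × Int × Int × Int × Int × Int :=
  (List.range n).foldl (fun st r => pvRound1 st (pvK.getD r 0) (W.getD r 0)) pvIVt

def pvWnL (W0 W1 : Int) : List Int := [W0, W1] ++ List.replicate 14 (0 : Int)

def pvWfc (W0 W1 : Int) (DWs : List Int) : List Int :=
  (List.range 16).map (fun i => pvMask ((pvWnL W0 W1).getD i 0 + DWs.getD i 0))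

-- A's loop body after reducing its shaRounds reads to pvIter states
def pvAstep (W0 W1 : Int) (DWs : List Int) (step : Nat) : List Int :=
  DWs.set (step + 3)
    (pvMask (-(pvE (pvIter (pvWfc W0 W1 DWs) (step + 4)) - pvE (pvIter (pvWnL W0 W1) (step + 4)))))

def pvAD (W0 W1 : Int) (DWs0 : List Int) (m : Nat) : List Int :=
  (List.range m).foldl (pvAstep W0 W1) DWs0

-- small getD facts (cite the library getElem? lemmas)
theorem pv_getD_set_ne (l : List Int) (i j : Nat) (a : Int) (h : i ≠ j) :
    (l.set i a).getD j 0 = l.getD j 0 := by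
  simp [List.getD, List.getElem?_set_ne h]

theorem pv_getD_set_self (l : List Int) (i : Nat) (a : Int) (h : i < l.length) :
    (l.set i a).getD i 0 = a := by
  simp [List.getD, h]

theorem pv_getD_concat_len (l : List Int) (a : Int) : (l ++ [a]).getD l.length 0 = a := by
  simp [List.getD]

theorem pvIter_succ (W : List Int) (n : Nat) :
    pvIter W (n + 1) = pvRound1 (pvIter W n) (pvK.getD n 0) (W.getD n 0) := by
  simp [pvIter, List.range_succ]

theorem pvIter_congr (W₁ W₂ : List Int) (n : Nat)
    (h : ∀ r < n, W₁.getD r 0 = W₂.getD r 0) : pvIter W₁ n = pvIter W₂ n := by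
  induction n with
  | zero => rfl
  | succ m ih =>
    rw [pvIter_succ, pvIter_succ, ih (fun r hr => h r (by omega)), h m (by omega)]

theorem pvRoundStep_eq (W : List Int)
    (st : Int × Int × Int × Int × Int × Int × Int × Int) (l : List (List Int)) (r : Nat) :
    pvRoundStep W (st, l) r =
      (pvRound1 st (pvK.getD r 0) (W.getD r 0),
       l ++ [pvToList (pvRound1 st (pvK.getD r 0) (W.getD r 0))]) := by
  obtain ⟨a, b, c, d, e, f, g, h⟩ := st
  rfl

theorem shaRounds_fold_eq (W : List Int) (R : Nat) :
    (List.range R).foldl (pvRoundStep W) pvInit =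
      (pvIter W R, (List.range (R + 1)).map (fun t => pvToList (pvIter W t))) := by
  induction R with
  | zero => rfl
  | succ n ih =>
    rw [List.range_succ, List.foldl_append, ih, List.foldl_cons, List.foldl_nil,
        pvRoundStep_eq, ← pvIter_succ, List.range_succ (n := n + 1), List.map_append,
        List.map_singleton]

theorem shaRounds_getD (W : List Int) (R t : Nat) (h : t ≤ R) :
    (shaRounds W R).getD t [] = pvToList (pvIter W t) := by
  unfold shaRounds
  rw [shaRounds_fold_eq]
  exact PySem.List.getD_map_range _ _ _ _ (by omega)

theorem pvToList_getD4 (st : Int × Int × Int × Int × Int × Int × Int × Int) :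
    (pvToList st).getD 4 0 = pvE st := rfl

theorem pvToList_getD0 (st : Int × Int × Int × Int × Int × Int × Int × Int) :
    (pvToList st).getD 0 0 = st.1 := rfl

-- the input words of a schedule are unchanged below any index the fold touches
theorem append_rep_getD (X : List Int) (k r : Nat) :
    (X ++ List.replicate k (0 : Int)).getD r 0 = X.getD r 0 := by
  rcases Nat.lt_or_ge r X.length with h | h
  · exact List.getD_append X _ 0 r h
  · rw [List.getD_eq_default _ _ h, List.getD, List.getElem?_append_right h]
    rcases Nat.lt_or_ge (r - X.length) k with h2 | h2
    · simp [h2]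
    · rw [List.getElem?_eq_none (by simpa using h2)]; rfl

theorem sched_fold_getD (l : List Nat) (W : List Int) (r : Nat) (h : ∀ i ∈ l, r < i) :
    (l.foldl pvSchedStep W).getD r 0 = W.getD r 0 := by
  induction l generalizing W with
  | nil => rfl
  | cons i tl ih =>
    rw [List.foldl_cons, ih _ (fun x hx => h x (by simp [hx]))]
    unfold pvSchedStep
    exact pv_getD_set_ne _ _ _ _ (by have := h i (by simp); omega)

theorem makeSchedule_getD_lt (X : List Int) (r : Nat) (h : r < 16) :
    (makeSchedule X).getD r 0 = X.getD r 0 := by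
  unfold makeSchedule
  rw [sched_fold_getD _ _ _ (fun i hi => by have := List.mem_range'_1.mp hi; omega)]
  exact append_rep_getD X 48 r

theorem makeSchedule_getD_16 (X : List Int) (h : X.length = 16) :
    (makeSchedule X).getD 16 0 =
      pvMask (pvSig1 (X.getD 14 0) + X.getD 9 0 + pvSig0 (X.getD 1 0) + X.getD 0 0) := by
  unfold makeSchedule
  rw [show (48 : Nat) = 47 + 1 from rfl, List.range'_succ, List.foldl_cons,
      sched_fold_getD _ _ _ (fun i hi => by have := List.mem_range'_1.mp hi; omega)]
  unfold pvSchedStep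
  rw [List.getD, List.getElem?_set_self (by simp [h]), Option.getD_some]
  rw [append_rep_getD, append_rep_getD, append_rep_getD, append_rep_getD]

-- cascade states up to round 16 see only the 16 input words, not the schedule extension
theorem pvIter_makeSchedule (X : List Int) (n : Nat) (h : n ≤ 16) :
    pvIter (makeSchedule X) n = pvIter X n :=
  pvIter_congr _ _ n (fun r hr => makeSchedule_getD_lt X r (by omega))

theorem pvMask_nonneg (x : Int) : 0 ≤ pvMask x := by
  rw [pvMask, PySem.Int.band_comm]
  exact PySem.Int.band_nonneg_of_nonneg_left _ (by norm_num)

theorem pvMask_le (x : Int) : pvMask x ≤ 4294967295 := by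
  unfold pvMask PySem.Int.band
  by_cases hx : 0 ≤ x
  · rw [if_pos hx, if_pos (by norm_num)]
    have h1 : x.toNat &&& (4294967295 : Int).toNat ≤ (4294967295 : Int).toNat := Nat.and_le_right
    have h2 : ((4294967295 : Int).toNat : Int) = 4294967295 := rfl
    omega
  · rw [if_neg (by omega), if_pos (by norm_num)]
    have h1 : (4294967295 : Int).toNat - ((4294967295 : Int).toNat &&& (-x - 1).toNat) ≤
        (4294967295 : Int).toNat := Nat.sub_le _ _
    have h2 : ((4294967295 : Int).toNat : Int) = 4294967295 := rfl
    omega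

theorem pvMask_idem (x : Int) : pvMask (pvMask x) = pvMask x := by
  have h1 : 0 ≤ pvMask x := pvMask_nonneg x
  have h2 : pvMask x ≤ 4294967295 := pvMask_le x
  have key : (pvMask x).toNat &&& 4294967295 = (pvMask x).toNat := by
    have := Nat.and_two_pow_sub_one_eq_mod (pvMask x).toNat 32
    norm_num at this
    omega
  conv_lhs => rw [pvMask, PySem.Int.band_of_nonneg h1 (by norm_num)]
  rw [show (4294967295 : Int).toNat = 4294967295 from rfl, key]
  exact Int.toNat_of_nonneg h1

-- Wn has zeros from index 2 on
theorem wn_getD_ge2 (W0 W1 : Int) (i : Nat) (h : 2 ≤ i) : (pvWnL W0 W1).getD i 0 = 0 := by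
  match i, h with
  | (n + 2), _ =>
    rw [pvWnL, List.getD_append_right _ _ _ _ (by simp)]
    show (List.replicate 14 (0 : Int)).getD n 0 = 0
    rw [List.getD]
    rcases Nat.lt_or_ge n 14 with h2 | h2
    · rw [List.getElem?_replicate]
      rw [if_pos h2]
      rfl
    · rw [List.getElem?_eq_none (by simpa using h2)]; rfl

theorem rep_getD_zero (k i : Nat) : (List.replicate k (0 : Int)).getD i 0 = 0 := by
  rw [List.getD]
  rcases Nat.lt_or_ge i k with h | h
  · rw [List.getElem?_replicate, if_pos h]
    rfl
  · rw [List.getElem?_eq_none (by simpa using h)]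
    rfl

theorem pvAD_succ (W0 W1 : Int) (D0 : List Int) (m : Nat) :
    pvAD W0 W1 D0 (m + 1) = pvAstep W0 W1 (pvAD W0 W1 D0 m) m := by
  rw [pvAD, List.range_succ, List.foldl_append, List.foldl_cons, List.foldl_nil, ← pvAD]

theorem pvAD_length (W0 W1 : Int) (D0 : List Int) (m : Nat) :
    (pvAD W0 W1 D0 m).length = D0.length := by
  induction m with
  | zero => rfl
  | succ n ih => rw [pvAD_succ]; simp [pvAstep, ih]

-- B's reference fold computes the iterated states, their e-components, and a at round 13
theorem refFold_eq (Wn : List Int) (n : Nat) :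
    ((List.range n).foldl
      (fun (acc : (Int × Int × Int × Int × Int × Int × Int × Int) × List Int × Int) r =>
        let a13' := if r = 13 then acc.1.1 else acc.2.2
        let st' := pvRound1 acc.1 (pvK.getD r 0) (Wn.getD r 0)
        (st', acc.2.1 ++ [st'.2.2.2.2.1], a13'))
      (pvIVt, [pvIVt.2.2.2.2.1], 0)) =
    (pvIter Wn n, (List.range (n + 1)).map (fun t => pvE (pvIter Wn t)),
     if 13 < n then (pvIter Wn 13).1 else 0) := by
  induction n with
  | zero => rfl
  | succ m ih =>
    rw [List.range_succ, List.foldl_append, ih, List.foldl_cons, List.foldl_nil]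
    show (pvRound1 (pvIter Wn m) (pvK.getD m 0) (Wn.getD m 0), _, _) = _
    rw [← pvIter_succ]
    refine congrArg₂ Prod.mk rfl (congrArg₂ Prod.mk ?_ ?_)
    · rw [List.range_succ (n := m + 1), List.map_append]
      rfl
    · show (if m = 13 then (pvIter Wn m).1 else if 13 < m then (pvIter Wn 13).1 else 0) =
          (if 13 < m + 1 then (pvIter Wn 13).1 else 0)
      split_ifs with h1 h2 h2 <;> first | (subst h1; rfl) | rfl | omega

-- the main loop invariant: B's incremental pass tracks A's staged recomputation
theorem mainInv (W0 W1 : Int) (refE DWs0 fw0 : List Int)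
    (st0 : Int × Int × Int × Int × Int × Int × Int × Int)
    (hrefE : ∀ t, t ≤ 16 → refE.getD t 0 = pvE (pvIter (pvWnL W0 W1) t))
    (hlen : DWs0.length = 16)
    (hfw0 : fw0 = (List.range 3).map (fun i => pvMask ((pvWnL W0 W1).getD i 0 + DWs0.getD i 0)))
    (hst0 : st0 = pvIter fw0 3)
    (hz : ∀ i, 3 ≤ i → DWs0.getD i 0 = 0) :
    ∀ m, m ≤ 13 →
      ((List.range m).foldl (fun acc step =>
          (acc.1 ++ [pvMask (refE.getD (3 + step + 1) 0 -
              (pvRound1 acc.2.1 (pvK.getD (3 + step) 0) 0).2.2.2.2.1)],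
           pvRound1 acc.2.1 (pvK.getD (3 + step) 0)
             (pvMask (refE.getD (3 + step + 1) 0 -
              (pvRound1 acc.2.1 (pvK.getD (3 + step) 0) 0).2.2.2.2.1)),
           if 3 + step = 13 then acc.2.1.1 else acc.2.2))
          (fw0, st0, (0 : Int)) =
        ((List.range (m + 3)).map
            (fun i => pvMask ((pvWnL W0 W1).getD i 0 + (pvAD W0 W1 DWs0 m).getD i 0)),
         pvIter ((List.range (m + 3)).map
            (fun i => pvMask ((pvWnL W0 W1).getD i 0 + (pvAD W0 W1 DWs0 m).getD i 0))) (m + 3),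
         if 10 < m then
           (pvIter ((List.range (m + 3)).map
              (fun i => pvMask ((pvWnL W0 W1).getD i 0 + (pvAD W0 W1 DWs0 m).getD i 0))) 13).1
         else 0)) ∧
      (∀ i, m + 3 ≤ i → (pvAD W0 W1 DWs0 m).getD i 0 = 0) := by
  intro m
  induction m with
  | zero =>
    intro _
    refine ⟨?_, fun i hi => hz i (by omega)⟩
    rw [List.range_zero, List.foldl_nil, pvAD, List.range_zero, List.foldl_nil,
        if_neg (by omega), ← hfw0, ← hst0]
  | succ m ih =>
    intro hm13
    obtain ⟨ihEq, ihZ⟩ := ih (by omega)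
    -- names for the current lists
    set Wn := pvWnL W0 W1 with hWnDef
    set Dm := pvAD W0 W1 DWs0 m with hDm
    set Fm := (List.range (m + 3)).map (fun i => pvMask (Wn.getD i 0 + Dm.getD i 0)) with hFm
    have hDmLen : Dm.length = 16 := by rw [hDm, pvAD_length, hlen]
    have hFmLen : Fm.length = m + 3 := by rw [hFm]; simp
    -- the correction value: A's and B's are the same term
    have hWfcPref : ∀ r < m + 3, (pvWfc W0 W1 Dm).getD r 0 = Fm.getD r 0 := by
      intro r hr
      rw [pvWfc, PySem.List.getD_map_range _ _ _ _ (by omega),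
          hFm, PySem.List.getD_map_range _ _ _ _ (by omega)]
    have hWfcAt : (pvWfc W0 W1 Dm).getD (m + 3) 0 = 0 := by
      rw [pvWfc, PySem.List.getD_map_range _ _ _ _ (by omega),
          wn_getD_ge2 _ _ _ (by omega), ihZ (m + 3) le_rfl]
      decide
    have hIterWfc : pvIter (pvWfc W0 W1 Dm) (m + 3) = pvIter Fm (m + 3) :=
      pvIter_congr _ _ _ hWfcPref
    have hEF : pvE (pvIter (pvWfc W0 W1 Dm) (m + 4)) =
        pvE (pvRound1 (pvIter Fm (m + 3)) (pvK.getD (m + 3) 0) 0) := by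
      rw [show m + 4 = (m + 3) + 1 from rfl, pvIter_succ, hWfcAt, hIterWfc]
    have hEN : refE.getD (3 + m + 1) 0 = pvE (pvIter Wn (m + 4)) := by
      rw [hrefE (3 + m + 1) (by omega), show 3 + m + 1 = m + 4 from by omega]
    -- the value A sets and the value B appends coincide
    set v := pvMask (-(pvE (pvIter (pvWfc W0 W1 Dm) (m + 4)) - pvE (pvIter Wn (m + 4)))) with hv
    have hvB : pvMask (refE.getD (3 + m + 1) 0 -
        (pvRound1 (pvIter Fm (m + 3)) (pvK.getD (3 + m) 0) 0).2.2.2.2.1) = v := by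
      show pvMask (refE.getD (3 + m + 1) 0 -
        pvE (pvRound1 (pvIter Fm (m + 3)) (pvK.getD (3 + m) 0) 0)) = v
      rw [hEN, hv, neg_sub, show 3 + m = m + 3 from by omega, ← hEF]
    have hD1 : pvAD W0 W1 DWs0 (m + 1) = Dm.set (m + 3) v := by
      rw [pvAD_succ, ← hDm, pvAstep]
    -- the new word list
    have hF1 : (List.range (m + 1 + 3)).map
        (fun i => pvMask (Wn.getD i 0 + (pvAD W0 W1 DWs0 (m + 1)).getD i 0)) = Fm ++ [v] := by
      rw [show m + 1 + 3 = (m + 3) + 1 from by omega, List.range_succ, List.map_append,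
          List.map_singleton, hD1]
      refine congrArg₂ _ ?_ ?_
      · rw [hFm]
        refine List.map_congr_left (fun i hi => ?_)
        have : i < m + 3 := List.mem_range.mp hi
        rw [pv_getD_set_ne _ _ _ _ (by omega)]
      · rw [pv_getD_set_self _ _ _ (by omega), wn_getD_ge2 _ _ _ (by omega), zero_add, hv,
            pvMask_idem]
    have hFv : (Fm ++ [v]).getD (m + 3) 0 = v := by
      rw [← hFmLen, pv_getD_concat_len]
    have hIterF1 : ∀ t ≤ m + 3, pvIter (Fm ++ [v]) t = pvIter Fm t := by
      intro t ht
      exact pvIter_congr _ _ _ (fun r hr => List.getD_append _ _ _ _ (by omega))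
    have hIter1 : pvIter (Fm ++ [v]) (m + 4) = pvRound1 (pvIter Fm (m + 3)) (pvK.getD (m + 3) 0) v := by
      rw [show m + 4 = (m + 3) + 1 from rfl, pvIter_succ (Fm ++ [v]) (m + 3), hFv,
          hIterF1 (m + 3) le_rfl]
    constructor
    · rw [List.range_succ, List.foldl_append, ihEq, List.foldl_cons, List.foldl_nil]
      dsimp only
      rw [hF1]
      refine congrArg₂ Prod.mk ?_ (congrArg₂ Prod.mk ?_ ?_)
      · rw [hvB]
      · show pvRound1 (pvIter Fm (m + 3)) (pvK.getD (3 + m) 0) _ = _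
        rw [hvB, show m + 1 + 3 = m + 4 from by omega, hIter1, show 3 + m = m + 3 from by omega]
      · show (if 3 + m = 13 then (pvIter Fm (m + 3)).1 else _) = _
        by_cases hm10 : m = 10
        · subst hm10
          rw [if_pos (by omega), if_pos (by omega), hIterF1 13 (by omega)]
        · rw [if_neg (by omega)]
          by_cases hgt : 10 < m
          · rw [if_pos hgt, if_pos (by omega), hIterF1 13 (by omega)]
          · rw [if_neg hgt, if_neg (by omega)]
    · intro i hi
      rw [hD1, pv_getD_set_ne _ _ _ _ (by omega)]
      exact ihZ i (by omega)

-- ===== VERDICT (by name: the statement is the Claim_ definition above) =====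
theorem compute_f17_with_j_spec : Claim_equal_compute_f17_with_j := by
  intro W0 W1 j _ _
  unfold Spec_compute_f17_with_j
  simp only [compute_f17_with_j, compute_f17_with_j_alt]
  rw [refFold_eq]
  dsimp only
  rw [if_pos (show (13 : Nat) < 16 by omega)]
  simp only [shaRounds_getD _ _ _ (le_refl _), shaRounds_getD _ 14 13 (by omega),
             pvToList_getD4, pvToList_getD0, pvIter_makeSchedule _ 3 (by omega),
             pvIter_makeSchedule _ 13 (by omega)]
  have hA : ∀ D0 : List Int,
      List.foldl (fun (DWs : List Int) (step : Nat) =>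
        DWs.set (step + 3)
          (pvMask (-(pvE (pvIter (makeSchedule (List.map (fun i =>
                pvMask ((([W0, W1] ++ List.replicate 14 (0 : Int))).getD i 0 + DWs.getD i 0)) (List.range 16))) (step + 4)) -
              pvE (pvIter (makeSchedule ([W0, W1] ++ List.replicate 14 (0 : Int))) (step + 4))))))
        D0 (List.range 13) = pvAD W0 W1 D0 13 := by
    intro D0
    rw [pvAD]
    refine PySem.List.foldl_congr_mem _ _ _ _ ?_
    intro DWs step hstep
    have h16 : step + 4 ≤ 16 := by have := List.mem_range.mp hstep; omega
    rw [pvIter_makeSchedule _ _ h16, pvIter_makeSchedule _ _ h16]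
    rfl
  simp only [hA]
  rw [show List.range' 2 14 = 2 :: List.range' 3 13 from rfl, List.foldl_cons]
  dsimp only
  rw [show List.range' 3 13 = (List.range 13).map (fun x => 3 + x) from by
        rw [List.range'_eq_map_range], List.foldl_map]
  rw [if_neg (show ¬((2 : Nat) = 13) by omega)]
  -- hypotheses of the main invariant at the concrete starting point
  have hrefE : ∀ t, t ≤ 16 → ((List.map (fun t => pvE (pvIter ([W0, W1] ++ List.replicate 14 (0 : Int)) t)) (List.range (16 + 1)))).getD t 0 = pvE (pvIter (pvWnL W0 W1) t) := by
    intro t ht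
    rw [PySem.List.getD_map_range _ _ _ _ (by omega)]
    rfl
  have hlen : ((((List.replicate 16 (0 : Int)).set 0 ((1 <<< j.toNat : Nat) : Int)).set 2 (pvMask (-(pvE (pvIter (List.map (fun i => pvMask (([W0, W1] ++ List.replicate 14 (0 : Int)).getD i 0 + ((List.replicate 16 (0 : Int)).set 0 ((1 <<< j.toNat : Nat) : Int)).getD i 0)) (List.range 16)) 3) - pvE (pvIter ([W0, W1] ++ List.replicate 14 (0 : Int)) 3)))))).length = 16 := by simp
  have hz : ∀ i, 3 ≤ i → ((((List.replicate 16 (0 : Int)).set 0 ((1 <<< j.toNat : Nat) : Int)).set 2 (pvMask (-(pvE (pvIter (List.map (fun i => pvMask (([W0, W1] ++ List.replicate 14 (0 : Int)).getD i 0 + ((List.replicate 16 (0 : Int)).set 0 ((1 <<< j.toNat : Nat) : Int)).getD i 0)) (List.range 16)) 3) - pvE (pvIter ([W0, W1] ++ List.replicate 14 (0 : Int)) 3)))))).getD i 0 = 0 := by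
    intro i hi
    rw [pv_getD_set_ne _ _ _ _ (by omega), pv_getD_set_ne _ _ _ _ (by omega), rep_getD_zero]
  have hiter2 : pvIter (List.map (fun i => pvMask (([W0, W1] ++ List.replicate 14 (0 : Int)).getD i 0 + ((List.replicate 16 (0 : Int)).set 0 ((1 <<< j.toNat : Nat) : Int)).getD i 0)) (List.range 16)) 2 = pvIter [pvMask (W0 + ((1 <<< j.toNat : Nat) : Int)), pvMask W1] 2 := by
    refine pvIter_congr _ _ 2 (fun r hr => ?_)
    interval_cases r
    · rw [PySem.List.getD_map_range _ _ _ _ (by omega),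
          show (([W0, W1] ++ List.replicate 14 (0 : Int))).getD 0 0 = W0 from rfl,
          pv_getD_set_self _ _ _ (by simp)]
      rfl
    · rw [PySem.List.getD_map_range _ _ _ _ (by omega),
          show (([W0, W1] ++ List.replicate 14 (0 : Int))).getD 1 0 = W1 from rfl,
          pv_getD_set_ne _ _ _ _ (by omega), rep_getD_zero, add_zero]
      rfl
  have hprobe : pvE (pvIter (List.map (fun i => pvMask (([W0, W1] ++ List.replicate 14 (0 : Int)).getD i 0 + ((List.replicate 16 (0 : Int)).set 0 ((1 <<< j.toNat : Nat) : Int)).getD i 0)) (List.range 16)) 3) =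
      (pvRound1 (List.foldl (fun st r => pvRound1 st (pvK.getD r 0) ([pvMask (W0 + ((1 <<< j.toNat : Nat) : Int)), pvMask W1].getD r 0)) pvIVt (List.range 2)) (pvK.getD 2 0) 0).2.2.2.2.1 := by
    rw [show (3 : Nat) = 2 + 1 from rfl, pvIter_succ (List.map (fun i => pvMask (([W0, W1] ++ List.replicate 14 (0 : Int)).getD i 0 + ((List.replicate 16 (0 : Int)).set 0 ((1 <<< j.toNat : Nat) : Int)).getD i 0)) (List.range 16)) 2,
        PySem.List.getD_map_range _ _ _ _ (by omega),
        show (([W0, W1] ++ List.replicate 14 (0 : Int))).getD 2 0 = 0 from rfl,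
        pv_getD_set_ne _ _ _ _ (by omega), rep_getD_zero,
        show pvMask (0 + 0) = 0 by decide, hiter2]
    rfl
  have hd2v : (pvMask ((List.map (fun t => pvE (pvIter ([W0, W1] ++ List.replicate 14 (0 : Int)) t)) (List.range (16 + 1))).getD (2 + 1) 0 - (pvRound1 (List.foldl (fun st r => pvRound1 st (pvK.getD r 0) ([pvMask (W0 + ((1 <<< j.toNat : Nat) : Int)), pvMask W1].getD r 0)) pvIVt (List.range 2)) (pvK.getD 2 0) 0).2.2.2.2.1)) = (pvMask (-(pvE (pvIter (List.map (fun i => pvMask (([W0, W1] ++ List.replicate 14 (0 : Int)).getD i 0 + ((List.replicate 16 (0 : Int)).set 0 ((1 <<< j.toNat : Nat) : Int)).getD i 0)) (List.range 16)) 3) - pvE (pvIter ([W0, W1] ++ List.replicate 14 (0 : Int)) 3)))) := by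
    rw [show ((List.map (fun t => pvE (pvIter ([W0, W1] ++ List.replicate 14 (0 : Int)) t)) (List.range (16 + 1)))).getD (2 + 1) 0 = pvE (pvIter (pvWnL W0 W1) (2 + 1)) from hrefE (2 + 1) (by omega),
        neg_sub, hprobe]
    rfl
  have hfw0 : ([pvMask (W0 + ((1 <<< j.toNat : Nat) : Int)), pvMask W1] ++ [(pvMask ((List.map (fun t => pvE (pvIter ([W0, W1] ++ List.replicate 14 (0 : Int)) t)) (List.range (16 + 1))).getD (2 + 1) 0 - (pvRound1 (List.foldl (fun st r => pvRound1 st (pvK.getD r 0) ([pvMask (W0 + ((1 <<< j.toNat : Nat) : Int)), pvMask W1].getD r 0)) pvIVt (List.range 2)) (pvK.getD 2 0) 0).2.2.2.2.1))]) =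
      (List.range 3).map (fun i => pvMask ((pvWnL W0 W1).getD i 0 + ((((List.replicate 16 (0 : Int)).set 0 ((1 <<< j.toNat : Nat) : Int)).set 2 (pvMask (-(pvE (pvIter (List.map (fun i => pvMask (([W0, W1] ++ List.replicate 14 (0 : Int)).getD i 0 + ((List.replicate 16 (0 : Int)).set 0 ((1 <<< j.toNat : Nat) : Int)).getD i 0)) (List.range 16)) 3) - pvE (pvIter ([W0, W1] ++ List.replicate 14 (0 : Int)) 3)))))).getD i 0)) := by
    rw [show List.range 3 = [0, 1, 2] from rfl, List.map_cons, List.map_cons, List.map_cons,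
        List.map_nil]
    rw [show (pvWnL W0 W1).getD 0 0 = W0 from rfl, show (pvWnL W0 W1).getD 1 0 = W1 from rfl,
        show (pvWnL W0 W1).getD 2 0 = 0 from rfl,
        pv_getD_set_ne _ _ _ _ (show (2 : Nat) ≠ 0 by omega), pv_getD_set_self _ _ _ (by simp),
        pv_getD_set_ne _ _ _ _ (show (2 : Nat) ≠ 1 by omega),
        pv_getD_set_ne _ _ _ _ (show (0 : Nat) ≠ 1 by omega), rep_getD_zero, add_zero,
        pv_getD_set_self _ _ _ (by simp), zero_add, pvMask_idem, hd2v]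
    rfl
  have hst0 : (pvRound1 (List.foldl (fun st r => pvRound1 st (pvK.getD r 0) ([pvMask (W0 + ((1 <<< j.toNat : Nat) : Int)), pvMask W1].getD r 0)) pvIVt (List.range 2)) (pvK.getD 2 0) (pvMask ((List.map (fun t => pvE (pvIter ([W0, W1] ++ List.replicate 14 (0 : Int)) t)) (List.range (16 + 1))).getD (2 + 1) 0 - (pvRound1 (List.foldl (fun st r => pvRound1 st (pvK.getD r 0) ([pvMask (W0 + ((1 <<< j.toNat : Nat) : Int)), pvMask W1].getD r 0)) pvIVt (List.range 2)) (pvK.getD 2 0) 0).2.2.2.2.1))) = pvIter ([pvMask (W0 + ((1 <<< j.toNat : Nat) : Int)), pvMask W1] ++ [(pvMask ((List.map (fun t => pvE (pvIter ([W0, W1] ++ List.replicate 14 (0 : Int)) t)) (List.range (16 + 1))).getD (2 + 1) 0 - (pvRound1 (List.foldl (fun st r => pvRound1 st (pvK.getD r 0) ([pvMask (W0 + ((1 <<< j.toNat : Nat) : Int)), pvMask W1].getD r 0)) pvIVt (List.range 2)) (pvK.getD 2 0) 0).2.2.2.2.1))]) 3 := by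
    rw [show (3 : Nat) = 2 + 1 from rfl, pvIter_succ ([pvMask (W0 + ((1 <<< j.toNat : Nat) : Int)), pvMask W1] ++ [(pvMask ((List.map (fun t => pvE (pvIter ([W0, W1] ++ List.replicate 14 (0 : Int)) t)) (List.range (16 + 1))).getD (2 + 1) 0 - (pvRound1 (List.foldl (fun st r => pvRound1 st (pvK.getD r 0) ([pvMask (W0 + ((1 <<< j.toNat : Nat) : Int)), pvMask W1].getD r 0)) pvIVt (List.range 2)) (pvK.getD 2 0) 0).2.2.2.2.1))]) 2,
        show (([pvMask (W0 + ((1 <<< j.toNat : Nat) : Int)), pvMask W1] ++ [(pvMask ((List.map (fun t => pvE (pvIter ([W0, W1] ++ List.replicate 14 (0 : Int)) t)) (List.range (16 + 1))).getD (2 + 1) 0 - (pvRound1 (List.foldl (fun st r => pvRound1 st (pvK.getD r 0) ([pvMask (W0 + ((1 <<< j.toNat : Nat) : Int)), pvMask W1].getD r 0)) pvIVt (List.range 2)) (pvK.getD 2 0) 0).2.2.2.2.1))])).getD 2 0 = (pvMask ((List.map (fun t => pvE (pvIter ([W0, W1] ++ List.replicate 14 (0 : Int)) t)) (List.range (16 +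 1))).getD (2 + 1) 0 - (pvRound1 (List.foldl (fun st r => pvRound1 st (pvK.getD r 0) ([pvMask (W0 + ((1 <<< j.toNat : Nat) : Int)), pvMask W1].getD r 0)) pvIVt (List.range 2)) (pvK.getD 2 0) 0).2.2.2.2.1)) from rfl,
        show pvIter ([pvMask (W0 + ((1 <<< j.toNat : Nat) : Int)), pvMask W1] ++ [(pvMask ((List.map (fun t => pvE (pvIter ([W0, W1] ++ List.replicate 14 (0 : Int)) t)) (List.range (16 + 1))).getD (2 + 1) 0 - (pvRound1 (List.foldl (fun st r => pvRound1 st (pvK.getD r 0) ([pvMask (W0 + ((1 <<< j.toNat : Nat) : Int)), pvMask W1].getD r 0)) pvIVt (List.range 2)) (pvK.getD 2 0) 0).2.2.2.2.1))]) 2 = pvIter [pvMask (W0 + ((1 <<< j.toNat : Nat) : Int)), pvMask W1] 2 from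
          pvIter_congr _ _ 2 (fun r hr => by interval_cases r <;> rfl)]
    rfl
  rw [(mainInv W0 W1 (List.map (fun t => pvE (pvIter ([W0, W1] ++ List.replicate 14 (0 : Int)) t)) (List.range (16 + 1))) (((List.replicate 16 (0 : Int)).set 0 ((1 <<< j.toNat : Nat) : Int)).set 2 (pvMask (-(pvE (pvIter (List.map (fun i => pvMask (([W0, W1] ++ List.replicate 14 (0 : Int)).getD i 0 + ((List.replicate 16 (0 : Int)).set 0 ((1 <<< j.toNat : Nat) : Int)).getD i 0)) (List.range 16)) 3) - pvE (pvIter ([W0, W1] ++ List.replicate 14 (0 : Int)) 3))))) ([pvMask (W0 + ((1 <<< j.toNat : Nat) : Int)), pvMask W1] ++ [(pvMask ((List.map (fun t => pvE (pvIter ([W0, W1] ++ List.replicate 14 (0 : Int)) t)) (List.range (16 + 1))).getD (2 + 1) 0 - (pvRound1 (List.foldl (fun st r => pvRound1 st (pvK.getD r 0) ([pvMask (W0 + ((1 <<< j.toNat : Nat) : Int)), pvMask W1].getD r 0)) pvIVt (List.range 2)) (pvK.getD 2 0) 0).2.2.2.2.1))]) (pvRound1 (List.foldl (fun st r => pvRound1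 st (pvK.getD r 0) ([pvMask (W0 + ((1 <<< j.toNat : Nat) : Int)), pvMask W1].getD r 0)) pvIVt (List.range 2)) (pvK.getD 2 0) (pvMask ((List.map (fun t => pvE (pvIter ([W0, W1] ++ List.replicate 14 (0 : Int)) t)) (List.range (16 + 1))).getD (2 + 1) 0 - (pvRound1 (List.foldl (fun st r => pvRound1 st (pvK.getD r 0) ([pvMask (W0 + ((1 <<< j.toNat : Nat) : Int)), pvMask W1].getD r 0)) pvIVt (List.range 2)) (pvK.getD 2 0) 0).2.2.2.2.1))) hrefE hlen hfw0 hst0 hz 13 (by omega)).1]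
  dsimp only
  rw [if_pos (show (10 : Nat) < 13 by omega)]
  simp only [pvWnL, show (13 : Nat) + 3 = 16 from rfl]
  rw [makeSchedule_getD_16 _ (by simp), makeSchedule_getD_16 _ (by simp)]
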